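-- pv_equiv track=rewrite | github.com/DanLeonardo/Advent-Of-Code-2019 | 01/part2/fuel.py | calculate_fuel_for_mass
-- ===== SOURCE A (Python) =====
-- def calculate_fuel(mass):
--     fuel = (mass // 3) - 2
--     if fuel <= 0:
--         return 0
--     else:
--         return fuel
--
-- def calculate_fuel_for_mass(mass):
--     fuel = calculate_fuel(mass)
--     if fuel <= 0:
--         return 0
--     else:
--         new_fuel = calculate_fuel_for_mass(fuel)
--         fuel += new_fuel
--         return fuel
-- ===== SOURCE B (Python) =====
-- def calculate_fuel_for_mass(mass):
--     chain = []
--     f = mass // 3 - 2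
--     while f > 0:
--         chain.append(f)
--         f = f // 3 - 2
--     return sum(chain)
-- ===== Notes on version B (the rewrite author's own statement) =====
-- stated objective: alternative
-- what changed: Replaces the recursion (clamping helper + recursive call adding the sub-result) with a loop that materializes the descending fuel chain as a list of unclamped positive values and returns its sum; no clamp is needed because the loop stops at the first non-positive fuel.
import Mathlib
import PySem

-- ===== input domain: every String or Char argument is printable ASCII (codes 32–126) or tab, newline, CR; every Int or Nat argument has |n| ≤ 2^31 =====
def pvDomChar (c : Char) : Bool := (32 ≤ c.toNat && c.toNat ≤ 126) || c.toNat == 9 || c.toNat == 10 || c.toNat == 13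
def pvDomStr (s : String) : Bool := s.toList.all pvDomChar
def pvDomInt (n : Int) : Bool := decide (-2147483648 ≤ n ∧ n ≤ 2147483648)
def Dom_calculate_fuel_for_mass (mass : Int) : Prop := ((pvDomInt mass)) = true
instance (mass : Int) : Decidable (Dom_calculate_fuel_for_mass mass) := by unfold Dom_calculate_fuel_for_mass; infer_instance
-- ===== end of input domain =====

-- B replaces A's clamped recursion by materializing the descending fuel chain as a list and summing it (objective: alternative).


-- ===== PORT A =====
-- helper calculate_fuel, transliterated
def pvCalculateFuel (mass : Int) : Int :=
  let fuel := PySem.Int.floordiv mass 3 - 2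
  if fuel ≤ 0 then 0 else fuel

-- termination lemma for A's recursion (cited by decreasing_by)
lemma pvCalculateFuel_lt (m : Int) (h : ¬ pvCalculateFuel m ≤ 0) :
    (pvCalculateFuel m).toNat < m.toNat := by
  have hd : PySem.Int.floordiv m 3 = m / 3 := PySem.Int.floordiv_eq_ediv_of_pos (by norm_num)
  simp only [pvCalculateFuel, hd] at h ⊢
  split_ifs with h' <;> omega

def calculate_fuel_for_mass (mass : Int) : Int :=
  let fuel := pvCalculateFuel mass
  if h : fuel ≤ 0 then 0
  else fuel + calculate_fuel_for_mass fuel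
termination_by mass.toNat
decreasing_by exact pvCalculateFuel_lt mass h

-- ===== PORT B =====
-- termination lemma for the chain builder (cited by decreasing_by)
lemma pvStep_lt (f : Int) (h : 0 < f) :
    (PySem.Int.floordiv f 3 - 2).toNat < f.toNat := by
  have hd : PySem.Int.floordiv f 3 = f / 3 := PySem.Int.floordiv_eq_ediv_of_pos (by norm_num)
  rw [hd]; omega

-- the while loop materialized: collect successive positive fuels into a list
def pvChain (f : Int) : List Int :=
  if h : 0 < f then f :: pvChain (PySem.Int.floordiv f 3 - 2) else []
termination_by f.toNat
decreasing_by exact pvStep_lt f h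

def calculate_fuel_for_mass_alt (mass : Int) : Int :=
  (pvChain (PySem.Int.floordiv mass 3 - 2)).sum

-- ===== PRECONDITION & SPEC =====
def Spec_calculate_fuel_for_mass (mass : Int) (out : Int) : Prop := out = calculate_fuel_for_mass_alt mass
instance (mass : Int) (out : Int) : Decidable (Spec_calculate_fuel_for_mass mass out) := by unfold Spec_calculate_fuel_for_mass; infer_instance

-- ===== CLAIM =====
def Claim_equal_calculate_fuel_for_mass : Prop := ∀ (mass : Int), Dom_calculate_fuel_for_mass mass → Spec_calculate_fuel_for_mass mass (calculate_fuel_for_mass mass)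

-- ===== LEMMAS AND PROOFS =====
lemma pvA_unfold (m : Int) : calculate_fuel_for_mass m =
    if pvCalculateFuel m ≤ 0 then 0
    else pvCalculateFuel m + calculate_fuel_for_mass (pvCalculateFuel m) := by
  rw [calculate_fuel_for_mass]; rfl

lemma pvChain_sum (n : Nat) : ∀ (m : Int), m.toNat = n →
    (pvChain (PySem.Int.floordiv m 3 - 2)).sum = calculate_fuel_for_mass m := by
  induction n using Nat.strong_induction_on with
  | _ n ih =>
    intro m hn
    have hd : PySem.Int.floordiv m 3 = m / 3 := PySem.Int.floordiv_eq_ediv_of_pos (by norm_num)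
    rw [pvA_unfold m]
    by_cases hg : 0 < PySem.Int.floordiv m 3 - 2
    · rw [pvChain]
      rw [dif_pos hg]
      have hcf : pvCalculateFuel m = PySem.Int.floordiv m 3 - 2 := by
        simp only [pvCalculateFuel]; omega
      have hlt : (PySem.Int.floordiv m 3 - 2).toNat < n := by
        rw [← hn]; exact pvStep_lt m (by rw [hd] at hg; omega)
      rw [List.sum_cons, ih _ hlt _ rfl, hcf]
      rw [if_neg (by omega)]
    · rw [pvChain, dif_neg hg]
      have hcf : pvCalculateFuel m = 0 := by simp only [pvCalculateFuel]; omega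
      rw [hcf, if_pos le_rfl]; rfl

-- ===== VERDICT =====
theorem calculate_fuel_for_mass_spec : Claim_equal_calculate_fuel_for_mass := by
  intro mass _
  unfold Spec_calculate_fuel_for_mass calculate_fuel_for_mass_alt
  exact (pvChain_sum mass.toNat mass rfl).symm
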